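-- pv_equiv track=rewrite | github.com/cocotimbogamingking-bit/proeycto | telegram_bot/bot.py | safe_markdown
-- ===== SOURCE A (Python) =====
-- def safe_markdown(text: str) -> str:
--     """Try to fix broken Markdown by removing unbalanced markers."""
--     if not text:
--         return ""
--     # Count occurrences of markdown markers
--     for marker in ("*", "_", "`"):
--         count = text.count(marker)
--         if count % 2 != 0:
--             # Odd number = unbalanced, escape all of them
--             text = text.replace(marker, f"\\{marker}")
--     return text
-- ===== SOURCE B (Python) =====
-- def safe_markdown(text: str) -> str:
--     """Try to fix broken Markdown by removing unbalanced markers."""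
--     if not text:
--         return ""
--     # One tally pass: parity flags for each marker.
--     star = under = tick = False
--     for ch in text:
--         if ch == "*":
--             star = not star
--         elif ch == "_":
--             under = not under
--         elif ch == "`":
--             tick = not tick
--
--     def esc(ch):
--         if (ch == "*" and star) or (ch == "_" and under) or (ch == "`" and tick):
--             return "\\" + ch
--         return ch
--
--     # One rebuild pass: escape every occurrence of an odd-count marker.
--     return "".join(esc(ch) for ch in text)
-- ===== Notes on version B (the rewrite author's own statement) =====
-- stated objective: alternative
-- what changed: Replaces A's three count-then-replace scans (six passes over ever-growing text) with a single parity-tally pass over the characters followed by one join rebuild pass that escapes odd-count markers.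
import Mathlib
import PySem

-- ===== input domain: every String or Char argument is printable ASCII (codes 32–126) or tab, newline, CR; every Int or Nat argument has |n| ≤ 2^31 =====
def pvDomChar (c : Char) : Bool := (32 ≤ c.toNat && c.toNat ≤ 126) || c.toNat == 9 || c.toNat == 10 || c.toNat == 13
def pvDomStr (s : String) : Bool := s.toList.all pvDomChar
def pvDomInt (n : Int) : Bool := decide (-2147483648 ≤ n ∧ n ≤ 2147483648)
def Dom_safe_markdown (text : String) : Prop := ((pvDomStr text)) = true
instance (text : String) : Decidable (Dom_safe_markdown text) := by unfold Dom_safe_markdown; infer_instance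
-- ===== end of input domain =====

-- B replaces A's three count/replace scans by one parity-tally pass plus one rebuild pass (alternative decomposition, same return values).


-- ===== PORT A =====
def safe_markdown (text : String) : String :=
  if text = "" then ""
  else
    ["*", "_", "`"].foldl
      (fun t marker =>
        if PySem.Str.count t marker % 2 ≠ 0 then
          PySem.Str.replace t marker ("\\" ++ marker)
        else t) text

-- ===== PORT B =====
-- one tally pass: toggle a parity flag per marker (B's for-loop state (star, under, tick))
def pvTallyStep (st : Bool × Bool × Bool) (ch : Char) : Bool × Bool × Bool :=
  if ch = '*' then (!st.1, st.2.1, st.2.2)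
  else if ch = '_' then (st.1, !st.2.1, st.2.2)
  else if ch = '`' then (st.1, st.2.1, !st.2.2)
  else st

-- B's esc helper, as the list of characters it contributes to the join
def pvEsc (star under tick : Bool) (ch : Char) : List Char :=
  if (ch = '*' ∧ star = true) ∨ (ch = '_' ∧ under = true) ∨ (ch = '`' ∧ tick = true) then
    ['\\', ch]
  else [ch]

def safe_markdown_alt (text : String) : String :=
  if text = "" then ""
  else
    let st := text.toList.foldl pvTallyStep (false, false, false)
    String.ofList (text.toList.flatMap (pvEsc st.1 st.2.1 st.2.2))

-- ===== PRECONDITION & SPEC =====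
def Spec_safe_markdown (text : String) (out : String) : Prop := out = safe_markdown_alt text
instance (text : String) (out : String) : Decidable (Spec_safe_markdown text out) := by unfold Spec_safe_markdown; infer_instance

-- ===== CLAIM (what is proved, stated in full; the proofs are below) =====
def Claim_equal_safe_markdown : Prop := ∀ (text : String), Dom_safe_markdown text → Spec_safe_markdown text (safe_markdown text)

-- ===== LEMMAS AND PROOFS =====

-- proof-side view of one conditional expansion: escape c as ['\', m] iff c is marker m and flag b is set
def pvF (b : Bool) (m : Char) (c : Char) : List Char :=
  if c = m ∧ b = true then ['\\', m] else [c]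

theorem pv_countgo (m : Char) : ∀ (l : List Char) (fuel acc : Nat), l.length ≤ fuel →
    PySem.Chars.count.go [m] fuel l acc = acc + l.count m := by
  intro l
  induction l with
  | nil => intro fuel acc h; cases fuel <;> simp [PySem.Chars.count.go]
  | cons h t ih =>
    intro fuel acc hf
    simp only [List.length_cons] at hf
    cases fuel with
    | zero => omega
    | succ n =>
      have hf' : t.length ≤ n := by omega
      by_cases he : h = m
      · subst he
        rw [PySem.Chars.count.go]
        simp only [List.isPrefixOf, beq_self_eq_true, Bool.true_and, if_true,
          List.length_singleton, List.drop_one, List.tail_cons]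
        rw [ih n (acc + 1) hf']
        simp
        omega
      · rw [PySem.Chars.count.go]
        have hp : ([m].isPrefixOf (h :: t)) = false := by
          simp [List.isPrefixOf]; exact fun hmh => he hmh.symm
        rw [hp]
        simp only [if_false, Bool.false_eq_true]
        rw [ih n acc hf']
        simp [List.count_cons]
        exact he

theorem pv_replacego (m : Char) (new : List Char) : ∀ (l : List Char) (fuel : Nat) (acc : List Char), l.length ≤ fuel →
    PySem.Chars.replace.go [m] new fuel l acc = acc.reverse ++ l.flatMap (fun c => if c = m then new else [c]) := by
  intro l
  induction l with
  | nil => intro fuel acc h; cases fuel <;> simp [PySem.Chars.replace.go]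
  | cons h t ih =>
    intro fuel acc hf
    simp only [List.length_cons] at hf
    cases fuel with
    | zero => omega
    | succ n =>
      have hf' : t.length ≤ n := by omega
      by_cases he : h = m
      · subst he
        rw [PySem.Chars.replace.go]
        simp only [List.isPrefixOf, beq_self_eq_true, Bool.true_and, if_true,
          List.length_singleton, List.drop_one, List.tail_cons]
        rw [ih n _ hf']
        simp
      · rw [PySem.Chars.replace.go]
        have hp : ([m].isPrefixOf (h :: t)) = false := by
          simp [List.isPrefixOf]; exact fun hmh => he hmh.symm
        rw [hp]
        simp only [if_false, Bool.false_eq_true]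
        rw [ih n _ hf']
        simp [he]

theorem pv_count_single (s : List Char) (m : Char) :
    PySem.Chars.count s [m] = s.count m := by
  simp [PySem.Chars.count, pv_countgo m s s.length 0 le_rfl]

theorem pv_replace_single (s : List Char) (m : Char) (new : List Char) :
    PySem.Chars.replace s [m] new = s.flatMap (fun c => if c = m then new else [c]) := by
  simp [PySem.Chars.replace, pv_replacego m new s s.length [] le_rfl]

-- one A-step, viewed as a flatMap with the flag = parity of the marker count
theorem pv_stepA (m : Char) (l : List Char) :
    (if PySem.Chars.count l [m] % 2 ≠ 0 then PySem.Chars.replace l [m] ['\\', m] else l)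
      = l.flatMap (pvF (decide (l.count m % 2 = 1)) m) := by
  rw [pv_count_single]
  by_cases hb : l.count m % 2 = 1
  · have hne : l.count m % 2 ≠ 0 := by omega
    simp only [hb, decide_true]
    rw [pv_replace_single]
    apply List.flatMap_congr
    intro c _
    by_cases hc : c = m <;> simp [pvF, hc]
  · have h0 : l.count m % 2 = 0 := by omega
    have hfm : l.flatMap (pvF (decide (l.count m % 2 = 1)) m) = l := by
      have hf : pvF (decide (l.count m % 2 = 1)) m = fun c => [c] := by
        funext c; simp [pvF, hb]
      rw [hf, List.flatMap_singleton']
    rw [if_neg (show ¬ l.count m % 2 ≠ 0 by omega)]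
    exact hfm.symm

-- counts of other characters survive a pvF expansion
theorem pv_count_flatMap (b : Bool) (m1 m2 : Char) (h1 : m2 ≠ m1) (h2 : m2 ≠ '\\') (l : List Char) :
    (l.flatMap (pvF b m1)).count m2 = l.count m2 := by
  induction l with
  | nil => simp
  | cons h t ih =>
    rw [List.flatMap_cons, List.count_append, ih, List.count_cons]
    by_cases hc : h = m1 ∧ b = true
    · obtain ⟨hh, hbt⟩ := hc
      subst hh hbt
      have hhm : (h == m2) = false := by simp; exact fun e => h1 e.symm
      simp [pvF, List.count_cons, Ne.symm h2, hhm]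
    · simp only [pvF, hc, if_false]
      simp [List.count_cons]
      omega

-- the three composed expansions, per character, equal B's esc
theorem pv_compose (b1 b2 b3 : Bool) (c : Char) :
    ((pvF b1 '*' c).flatMap (pvF b2 '_')).flatMap (pvF b3 '`') = pvEsc b1 b2 b3 c := by
  by_cases h1 : c = '*'
  · subst h1; cases b1 <;> cases b2 <;> cases b3 <;> rfl
  · by_cases h2 : c = '_'
    · subst h2; cases b1 <;> cases b2 <;> cases b3 <;> rfl
    · by_cases h3 : c = '`'
      · subst h3; cases b1 <;> cases b2 <;> cases b3 <;> rfl
      · simp [pvF, pvEsc, h1, h2, h3]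

-- B's tally fold computes the parity flags of the three marker counts
theorem pv_tally (l : List Char) : ∀ (a b c : Bool),
    l.foldl pvTallyStep (a, b, c) =
      (a.xor (decide (l.count '*' % 2 = 1)),
       b.xor (decide (l.count '_' % 2 = 1)),
       c.xor (decide (l.count '`' % 2 = 1))) := by
  induction l with
  | nil => intro a b c; simp
  | cons h t ih =>
    intro a b c
    have hpar : ∀ (x : Bool) (n : Nat), (!x).xor (decide (n % 2 = 1)) = x.xor (decide ((n + 1) % 2 = 1)) := by
      intro x n
      by_cases hn : n % 2 = 1
      · have h2 : (n + 1) % 2 = 0 := by omega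
        cases x <;> simp [hn, h2]
      · have h0 : n % 2 = 0 := by omega
        have h2 : (n + 1) % 2 = 1 := by omega
        cases x <;> simp [h0, h2]
    by_cases h1 : h = '*'
    · subst h1
      have c1 : List.count '*' ('*' :: t) = t.count '*' + 1 := by simp
      have c2 : List.count '_' ('*' :: t) = t.count '_' := by simp
      have c3 : List.count '`' ('*' :: t) = t.count '`' := by simp
      rw [List.foldl_cons, show pvTallyStep (a, b, c) '*' = (!a, b, c) from rfl, ih, c1, c2, c3, hpar a]
    · by_cases h2 : h = '_'
      · subst h2
        have c1 : List.count '*' ('_' :: t) = t.count '*' := by simp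
        have c2 : List.count '_' ('_' :: t) = t.count '_' + 1 := by simp
        have c3 : List.count '`' ('_' :: t) = t.count '`' := by simp
        rw [List.foldl_cons, show pvTallyStep (a, b, c) '_' = (a, !b, c) from rfl, ih, c1, c2, c3, hpar b]
      · by_cases h3 : h = '`'
        · subst h3
          have c1 : List.count '*' ('`' :: t) = t.count '*' := by simp
          have c2 : List.count '_' ('`' :: t) = t.count '_' := by simp
          have c3 : List.count '`' ('`' :: t) = t.count '`' + 1 := by simp
          rw [List.foldl_cons, show pvTallyStep (a, b, c) '`' = (a, b, !c) from rfl, ih, c1, c2, c3, hpar c]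
        · have hs : pvTallyStep (a, b, c) h = (a, b, c) := by simp [pvTallyStep, h1, h2, h3]
          have c1 : List.count '*' (h :: t) = t.count '*' := by simp [List.count_cons]; exact h1
          have c2 : List.count '_' (h :: t) = t.count '_' := by simp [List.count_cons]; exact h2
          have c3 : List.count '`' (h :: t) = t.count '`' := by simp [List.count_cons]; exact h3
          rw [List.foldl_cons, hs, ih, c1, c2, c3]

-- ===== VERDICT (by name: the statement is the Claim_ definition above) =====
theorem safe_markdown_spec : Claim_equal_safe_markdown := by
  intro text _
  unfold Spec_safe_markdown safe_markdown safe_markdown_alt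
  by_cases ht : text = ""
  · subst ht; rfl
  · rw [if_neg ht, if_neg ht, List.foldl_cons, List.foldl_cons, List.foldl_cons, List.foldl_nil]
    apply String.toList_inj.mp
    -- abbreviations for the three parity flags of the ORIGINAL text
    have hstep : ∀ (t : String) (m : Char) (mk esc : String), mk.toList = [m] → esc.toList = ['\\', m] →
        (if PySem.Str.count t mk % 2 ≠ 0 then PySem.Str.replace t mk esc else t).toList
          = t.toList.flatMap (pvF (decide (t.toList.count m % 2 = 1)) m) := by
      intro t m mk esc hmk hesc
      rw [apply_ite String.toList]
      have hc : PySem.Str.count t mk = PySem.Chars.count t.toList [m] := by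
        simp [PySem.Str.count, hmk]
      have hr : (PySem.Str.replace t mk esc).toList = PySem.Chars.replace t.toList [m] ['\\', m] := by
        simp [PySem.Str.replace, hmk, hesc]
      rw [hc, hr, ← apply_ite (fun l => l) , pv_stepA m t.toList]
    have h1 := hstep text '*' "*" ("\\" ++ "*") rfl rfl
    set b1 := decide (text.toList.count '*' % 2 = 1) with hb1
    set t1 := (if PySem.Str.count text "*" % 2 ≠ 0 then PySem.Str.replace text "*" ("\\" ++ "*") else text) with ht1
    have h2 := hstep t1 '_' "_" ("\\" ++ "_") rfl rfl
    have hc2 : t1.toList.count '_' = text.toList.count '_' := by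
      rw [h1]; exact pv_count_flatMap b1 '*' '_' (by decide) (by decide) _
    rw [hc2] at h2
    set b2 := decide (text.toList.count '_' % 2 = 1) with hb2
    set t2 := (if PySem.Str.count t1 "_" % 2 ≠ 0 then PySem.Str.replace t1 "_" ("\\" ++ "_") else t1) with ht2
    have h3 := hstep t2 '`' "`" ("\\" ++ "`") rfl rfl
    have hc3 : t2.toList.count '`' = text.toList.count '`' := by
      rw [h2, h1]
      rw [pv_count_flatMap b2 '_' '`' (by decide) (by decide) _]
      exact pv_count_flatMap b1 '*' '`' (by decide) (by decide) _
    rw [hc3] at h3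
    set b3 := decide (text.toList.count '`' % 2 = 1) with hb3
    -- left side is now three stacked flatMaps over the original characters
    rw [h3, h2, h1, List.flatMap_assoc, List.flatMap_assoc]
    -- right side: the tally fold computes exactly (b1, b2, b3)
    show _ = (String.ofList (text.toList.flatMap
        (pvEsc (text.toList.foldl pvTallyStep (false, false, false)).1
               (text.toList.foldl pvTallyStep (false, false, false)).2.1
               (text.toList.foldl pvTallyStep (false, false, false)).2.2))).toList
    rw [pv_tally text.toList false false false]
    simp only [Bool.false_xor, String.toList_ofList]
    apply List.flatMap_congr
    intro c _
    rw [← List.flatMap_assoc, ← hb1, ← hb2, ← hb3]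
    exact pv_compose b1 b2 b3 c
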